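-- pv_equiv track=rewrite | github.com/ah9mon/Algorithm_TIL | Python/Algorithm/SWEA/D2/1948.py | day_counter
-- ===== SOURCE A (Python) =====
-- def day_counter(list):
--     month_day = {1 : 31, 2:28, 3:31, 4:30, 5:31, 6:30, 7:31, 8:31, 9:30, 10:31, 11:30, 12:31}
--
--     day_count = 0
--
--     #  list[0] 과 list[2] 사이에 있는 month의 day수를 daycount에 더하기
--     if list[0] < list[2]:
--         # month 차이 처리
--         for month in range(list[0]+1,list[2]):
--             day_count += month_day.get(month)
--
--         # day 차이 처리
--         day_count += (month_day.get(list[0]) - list[1] + 1) + list[3] # 그 달의 남은 일수 + 2번째 입력 날짜값의 일 수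
--
--
--     elif list[0] == list[2]: # 같은 달이면
--         day_count += list[3] - list[1] + 1 # 그냥 일 수 차이 계산
--
--     return day_count
-- ===== SOURCE B (Python) =====
-- def day_counter(list):
--     # day-of-year via a cumulative prefix-sum over month lengths, instead of looping over in-between months
--     month_len = [31, 28, 31, 30, 31, 30, 31, 31, 30, 31, 30, 31]
--     if list[0] > list[2]:
--         return 0
--     m1, d1, m2, d2 = list[0], list[1], list[2], list[3]
--     if m1 == m2:
--         return d2 - d1 + 1
--     cum = [0]
--     for ml in month_len:
--         cum.append(cum[-1] + ml)
--     return (cum[m2 - 1] + d2) - (cum[m1 - 1] + d1) + 1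
-- ===== Notes on version B (the rewrite author's own statement) =====
-- stated objective: simpler
-- what changed: Replaces A's loop over the in-between months by a day-of-year computation from a cumulative prefix-sum table of month lengths, returning doy(m2,d2)-doy(m1,d1)+1.
import Mathlib
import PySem

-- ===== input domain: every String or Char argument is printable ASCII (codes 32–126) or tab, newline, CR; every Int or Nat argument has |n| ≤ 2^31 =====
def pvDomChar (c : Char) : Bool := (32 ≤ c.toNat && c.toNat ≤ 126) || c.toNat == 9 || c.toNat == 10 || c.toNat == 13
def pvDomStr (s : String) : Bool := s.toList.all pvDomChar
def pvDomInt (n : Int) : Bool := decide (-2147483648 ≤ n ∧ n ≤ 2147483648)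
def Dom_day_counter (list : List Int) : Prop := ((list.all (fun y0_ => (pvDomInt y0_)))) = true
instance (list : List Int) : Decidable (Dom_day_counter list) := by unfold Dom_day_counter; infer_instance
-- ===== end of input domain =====

-- B replaces A's loop over the in-between months by a day-of-year computed from a prefix-sum table (objective: simpler).

-- ===== PORT A =====
def monthDayA : PySem.Dict Int Int :=
  PySem.Dict.ofList [(1,31),(2,28),(3,31),(4,30),(5,31),(6,30),(7,31),(8,31),(9,30),(10,31),(11,30),(12,31)]

-- list[i] ported as pyGetD … 0 and month_day.get(m) as getD … 0: exact under Pre_, which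
-- guarantees every list index is in range and every dict access hits (Python raises otherwise).
def day_counter (list : List Int) : Int :=
  let day_count : Int := 0
  if PySem.List.pyGetD list 0 0 < PySem.List.pyGetD list 2 0 then
    let day_count :=
      (PySem.List.pyRange (PySem.List.pyGetD list 0 0 + 1) (PySem.List.pyGetD list 2 0) 1).foldl
        (fun acc month => acc + monthDayA.getD month 0) day_count
    day_count + (monthDayA.getD (PySem.List.pyGetD list 0 0) 0 - PySem.List.pyGetD list 1 0 + 1)
      + PySem.List.pyGetD list 3 0
  else if PySem.List.pyGetD list 0 0 == PySem.List.pyGetD list 2 0 then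
    day_count + (PySem.List.pyGetD list 3 0 - PySem.List.pyGetD list 1 0 + 1)
  else
    day_count

-- ===== PORT B =====
def monthLenB : List Int := [31, 28, 31, 30, 31, 30, 31, 31, 30, 31, 30, 31]

def day_counter_alt (list : List Int) : Int :=
  if PySem.List.pyGetD list 0 0 > PySem.List.pyGetD list 2 0 then 0
  else
    let m1 := PySem.List.pyGetD list 0 0
    let d1 := PySem.List.pyGetD list 1 0
    let m2 := PySem.List.pyGetD list 2 0
    let d2 := PySem.List.pyGetD list 3 0
    if m1 == m2 then d2 - d1 + 1
    else
      let cum := monthLenB.foldl (fun c ml => c ++ [PySem.List.pyGetD c (-1) 0 + ml]) [0]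
      (PySem.List.pyGetD cum (m2 - 1) 0 + d2) - (PySem.List.pyGetD cum (m1 - 1) 0 + d1) + 1

-- ===== PRECONDITION & SPEC =====
-- Pre_ = exactly the inputs where Python A returns: the list has at least three elements; when the
-- start month is at most the end month A also reads a fourth element, and when it is strictly below
-- every month_day.get must hit (months within 1..12), else A raises on None arithmetic.
def Pre_day_counter (list : List Int) : Prop :=
  3 ≤ list.length ∧
  (PySem.List.pyGetD list 0 0 ≤ PySem.List.pyGetD list 2 0 →
    4 ≤ list.length ∧
    (PySem.List.pyGetD list 0 0 < PySem.List.pyGetD list 2 0 →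
      1 ≤ PySem.List.pyGetD list 0 0 ∧ PySem.List.pyGetD list 2 0 ≤ 12))
instance (list : List Int) : Decidable (Pre_day_counter list) := by unfold Pre_day_counter; infer_instance

def pvWitness_day_counter : List Int := [3, 5, 7, 20]

def Spec_day_counter (list : List Int) (out : Int) : Prop := out = day_counter_alt list
instance (list : List Int) (out : Int) : Decidable (Spec_day_counter list out) := by unfold Spec_day_counter; infer_instance

-- ===== CLAIM (what is proved, stated in full; the proofs are below) =====
def Claim_equal_day_counter : Prop := ∀ (list : List Int), Dom_day_counter list → Pre_day_counter list → Spec_day_counter list (day_counter list)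

-- ===== LEMMAS AND PROOFS =====

-- the constant parts of the two expressions agree for every 1 ≤ m1 < m2 ≤ 12
theorem pv_key (m1 m2 : Int) (h1 : 1 ≤ m1) (h2 : m1 < m2) (h3 : m2 ≤ 12) :
    (PySem.List.pyRange (m1 + 1) m2 1).foldl (fun acc month => acc + monthDayA.getD month 0) 0
      + monthDayA.getD m1 0
    = PySem.List.pyGetD
        (monthLenB.foldl (fun c ml => c ++ [PySem.List.pyGetD c (-1) 0 + ml]) [0]) (m2 - 1) 0
      - PySem.List.pyGetD
        (monthLenB.foldl (fun c ml => c ++ [PySem.List.pyGetD c (-1) 0 + ml]) [0]) (m1 - 1) 0 := by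
  have h1' : m1 ≤ 11 := by omega
  interval_cases m1 <;> interval_cases m2 <;> decide

theorem day_counter_spec : Claim_equal_day_counter := by
  intro list _ hpre
  obtain ⟨hlen3, hle⟩ := hpre
  unfold Spec_day_counter day_counter day_counter_alt
  rcases lt_trichotomy (PySem.List.pyGetD list 0 0) (PySem.List.pyGetD list 2 0) with h | h | h
  · obtain ⟨-, hm⟩ := hle (le_of_lt h)
    obtain ⟨hm1, hm2⟩ := hm h
    simp only [if_pos h, gt_iff_lt, if_neg (lt_asymm h), beq_iff_eq, if_neg (ne_of_lt h)]
    have := pv_key _ _ hm1 h hm2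
    omega
  · simp [h]
  · simp [if_neg (not_lt_of_gt h), if_pos h, beq_iff_eq, ne_of_gt h]
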